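-- pv_equiv track=rewrite | github.com/chrisjdavie/leetcode_2025 | interviews/repeated_strings/solution.py | reduce_repeated_strings
-- ===== SOURCE A (Python) =====
-- def reduce_repeated_strings(input_str: str, max_len: int) -> str:
--
--     current_char: str = ""
--     char_count: int = -1
--
--     result: list[str] = []
--
--     for this_char in input_str:
--         if current_char != this_char:
--             current_char = this_char
--             char_count = 0
--         if not (current_char == this_char and char_count >= max_len):
--             result.append(current_char)
--             char_count += 1
--
--     return "".join(result)
-- ===== SOURCE B (Python) =====
-- def reduce_repeated_strings(input_str: str, max_len: int) -> str:
--     # Decompose the string into maximal runs of one character and emit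
--     # char * min(run_length, max_len) per run (non-positive counts give "").
--     out: list[str] = []
--     i, n = 0, len(input_str)
--     while i < n:
--         j = i + 1
--         while j < n and input_str[j] == input_str[i]:
--             j += 1
--         out.append(input_str[i] * min(j - i, max_len))
--         i = j
--     return "".join(out)
-- ===== Notes on version B (the rewrite author's own statement) =====
-- stated objective: alternative
-- what changed: Replaces A's per-character current_char/char_count state machine with a run-decomposition pass: scan each maximal run of identical characters and emit char * min(run_length, max_len).
import Mathlib
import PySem

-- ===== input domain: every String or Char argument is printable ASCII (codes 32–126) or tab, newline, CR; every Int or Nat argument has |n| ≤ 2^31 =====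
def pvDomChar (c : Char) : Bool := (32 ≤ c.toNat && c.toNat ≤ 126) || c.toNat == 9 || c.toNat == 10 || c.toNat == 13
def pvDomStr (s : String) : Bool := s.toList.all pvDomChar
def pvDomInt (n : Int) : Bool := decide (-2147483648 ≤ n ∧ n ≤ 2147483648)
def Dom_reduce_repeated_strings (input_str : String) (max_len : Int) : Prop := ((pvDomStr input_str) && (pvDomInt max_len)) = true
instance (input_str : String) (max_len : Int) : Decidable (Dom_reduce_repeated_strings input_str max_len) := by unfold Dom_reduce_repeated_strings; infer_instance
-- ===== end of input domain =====

-- B replaces A's per-character current_char/char_count state machine by a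
-- run-decomposition pass (emit char * min(run_length, max_len) per maximal run);
-- same cost, alternative structure.

-- ===== PORT A =====
-- one iteration of A's for-loop; state = (current_char, char_count, result);
-- current_char = none models Python's initial "" (appending "" contributes nothing to the join)
def stepA (max_len : Int) (s : Option Char × Int × List Char) (c : Char) : Option Char × Int × List Char :=
  let cur := if s.1 ≠ some c then some c else s.1
  let cnt := if s.1 ≠ some c then (0 : Int) else s.2.1
  if ¬(cur = some c ∧ max_len ≤ cnt) then
    (cur, cnt + 1, s.2.2 ++ cur.elim [] (fun d => [d]))
  else
    (cur, cnt, s.2.2)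

def reduce_repeated_strings (input_str : String) (max_len : Int) : String :=
  String.ofList (input_str.toList.foldl (stepA max_len) (none, -1, [])).2.2

-- ===== PORT B =====
-- length of B's inner while-loop scan: how many leading chars equal c
def countRun (c : Char) : List Char → Nat
  | [] => 0
  | d :: rest => if d == c then countRun c rest + 1 else 0

-- B's outer while-loop: consume one maximal run per iteration
def altGo (max_len : Int) : List Char → List Char
  | [] => []
  | c :: rest =>
      let m := countRun c rest
      List.replicate (min ((m + 1 : Nat) : Int) max_len).toNat c
        ++ altGo max_len (rest.drop m)
  termination_by l => l.length
  decreasing_by simp only [List.length_drop, List.length_cons]; omega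

def reduce_repeated_strings_alt (input_str : String) (max_len : Int) : String :=
  String.ofList (altGo max_len input_str.toList)

-- ===== PRECONDITION & SPEC =====
def Spec_reduce_repeated_strings (input_str : String) (max_len : Int) (out : String) : Prop := out = reduce_repeated_strings_alt input_str max_len
instance (input_str : String) (max_len : Int) (out : String) : Decidable (Spec_reduce_repeated_strings input_str max_len out) := by unfold Spec_reduce_repeated_strings; infer_instance

-- ===== CLAIM (what is proved, stated in full; the proofs are below) =====
def Claim_equal_reduce_repeated_strings : Prop := ∀ (input_str : String) (max_len : Int), Dom_reduce_repeated_strings input_str max_len → Spec_reduce_repeated_strings input_str max_len (reduce_repeated_strings input_str max_len)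

-- ===== LEMMAS AND PROOFS =====

lemma countRun_le (c : Char) : ∀ l : List Char, countRun c l ≤ l.length := by
  intro l; induction l with
  | nil => simp [countRun]
  | cons d rest ih => by_cases h : d == c <;> simp [countRun, h] <;> omega


lemma mem_take_countRun (c : Char) : ∀ l : List Char, ∀ x ∈ l.take (countRun c l), x = c := by
  intro l; induction l with
  | nil => simp
  | cons d rest ih =>
      by_cases h : d = c
      · subst h; simp only [countRun, beq_self_eq_true, if_true, List.take_succ_cons]
        intro x hx
        rcases List.mem_cons.mp hx with h' | h'
        · exact h'
        · exact ih x h'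
      · simp [countRun, h]

lemma head_drop_countRun (c : Char) : ∀ l : List Char, ∀ d, (l.drop (countRun c l)).head? = some d → d ≠ c := by
  intro l; induction l with
  | nil => simp
  | cons e rest ih =>
      by_cases h : e = c
      · subst h; simpa [countRun] using ih
      · intro d hd
        simp [countRun, h] at hd
        simpa [hd] using h

-- processing a run of characters all equal to the current char, with count t
lemma inner_run (max_len : Int) (c : Char) :
    ∀ (run : List Char), (∀ x ∈ run, x = c) → ∀ (t : Nat) (res : List Char),
      List.foldl (stepA max_len) (some c, (t : Int), res) run
        = (some c, ((t + min run.length (max_len - t).toNat : Nat) : Int),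
           res ++ List.replicate (min run.length (max_len - t).toNat) c) := by
  intro run
  induction run with
  | nil => intro _ t res; simp
  | cons x rs ih =>
      intro hall t res
      have hx : x = c := hall x (by simp)
      subst hx
      have hrs : ∀ y ∈ rs, y = x := fun y hy => hall y (by simp [hy])
      by_cases h : max_len ≤ (t : Int)
      · have h0 : (max_len - (t : Int)).toNat = 0 := by omega
        simp only [List.foldl_cons, stepA, ne_eq, not_true_eq_false, if_false]
        rw [if_neg (by simp [h])]
        rw [ih hrs t res]
        simp [h0]
      · have hstep : min (rs.length + 1) (max_len - (t : Int)).toNat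
            = min rs.length (max_len - ((t : Nat) + 1 : Nat)).toNat + 1 := by
          omega
        simp only [List.foldl_cons, stepA, ne_eq, not_true_eq_false, if_false]
        rw [if_pos (by simp [h])]
        have hc : ((t : Int) + 1) = (((t + 1 : Nat)) : Int) := by push_cast; ring
        simp only [Option.elim, hc]
        rw [ih hrs (t + 1) (res ++ [x])]
        simp only [List.length_cons, hstep]
        have harith : t + 1 + min rs.length (max_len - ((t + 1 : Nat) : Int)).toNat
            = t + (min rs.length (max_len - ((t + 1 : Nat) : Int)).toNat + 1) := by omega
        rw [harith]
        simp [List.replicate_succ, List.append_assoc]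

-- the whole loop, entered at a run boundary, produces altGo
lemma outer (max_len : Int) :
    ∀ (n : Nat) (l : List Char), l.length ≤ n → ∀ (cur : Option Char) (cnt : Int) (res : List Char),
      (∀ c, l.head? = some c → cur ≠ some c) →
      (List.foldl (stepA max_len) (cur, cnt, res) l).2.2 = res ++ altGo max_len l := by
  intro n
  induction n with
  | zero =>
      intro l hl cur cnt res _
      have hnil : l = [] := List.length_eq_zero_iff.mp (by omega)
      subst hnil; simp only [List.foldl_nil]; rw [altGo]; simp
  | succ n ih =>
      intro l hl cur cnt res hb
      cases l with
      | nil => simp only [List.foldl_nil]; rw [altGo]; simp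
      | cons c rest =>
          have hcur : cur ≠ some c := hb c rfl
          have haltgo : altGo max_len (c :: rest)
              = List.replicate (min ((countRun c rest + 1 : Nat) : Int) max_len).toNat c
                ++ altGo max_len (rest.drop (countRun c rest)) := by
            rw [altGo]
          set m := countRun c rest with hm
          have hmle : m ≤ rest.length := countRun_le c rest
          have hsplit : rest = rest.take m ++ rest.drop m := (List.take_append_drop m rest).symm
          have htlen : (rest.take m).length = m := by simp [List.length_take]; omega
          have hdlen : (rest.drop m).length ≤ n := by simp [List.length_drop]; simp at hl; omega
          have hbd : ∀ d, (rest.drop m).head? = some d → (some c : Option Char) ≠ some d := by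
            intro d hd
            simpa [eq_comm] using (head_drop_countRun c rest d hd)
          -- first character: reset
          simp only [List.foldl_cons, stepA, hcur, ne_eq, not_false_eq_true, if_true]
          by_cases hml : max_len ≤ (0 : Int)
          · rw [if_neg (by simp [hml])]
            conv_lhs => rw [hsplit]
            rw [List.foldl_append]
            have h0 : ((0 : Nat) : Int) = (0 : Int) := by norm_num
            rw [← h0, inner_run max_len c (rest.take m) (mem_take_countRun c rest) 0 res]
            have hz : (max_len - ((0:Nat) : Int)).toNat = 0 := by omega
            rw [hz]
            simp only [Nat.min_zero, List.replicate_zero, List.append_nil, Nat.add_zero]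
            rw [ih (rest.drop m) hdlen _ _ _ hbd]
            rw [haltgo]
            simp
            omega
          · rw [if_pos (by simp [hml])]
            conv_lhs => rw [hsplit]
            rw [List.foldl_append]
            have h1 : (0 : Int) + 1 = ((1 : Nat) : Int) := by norm_num
            simp only [Option.elim]
            rw [h1, inner_run max_len c (rest.take m) (mem_take_countRun c rest) 1 (res ++ [c])]
            rw [ih (rest.drop m) hdlen _ _ _ hbd]
            rw [haltgo, htlen]
            have hcount : (min ((m + 1 : Nat) : Int) max_len).toNat
                = min m (max_len - ((1:Nat) : Int)).toNat + 1 := by omega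
            rw [hcount]
            simp [List.replicate_succ, List.append_assoc]

-- ===== VERDICT (by name: the statement is the Claim_ definition above) =====
theorem reduce_repeated_strings_spec : Claim_equal_reduce_repeated_strings := by
  intro input_str max_len _
  unfold Spec_reduce_repeated_strings reduce_repeated_strings reduce_repeated_strings_alt
  congr 1
  exact outer max_len input_str.toList.length input_str.toList le_rfl none (-1) []
    (by intro c _ h; cases h)
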